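-- pv_equiv track=rewrite | github.com/wetzel-cam/aoc_2023 | Day_1/day1.py | get_numbers_from_line
-- ===== SOURCE A (Python) =====
-- def get_numbers_from_line(line):
-- 	pair = []
--
-- 	for n in range(1, 10):
-- 		right_index = line.find(str(n))
-- 		left_index = line.rfind(str(n))
--
-- 		if left_index == -1 and right_index == -1:
-- 			continue
-- 		elif (left_index == right_index):
-- 			pair.append((int(line[left_index]), left_index))
-- 		else:
-- 			if left_index != -1:
-- 				pair.append((int(line[left_index]), left_index))
-- 			if right_index != -1:
-- 				pair.append((int(line[right_index]), right_index))
--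
-- 	return pair
-- ===== SOURCE B (Python) =====
-- def get_numbers_from_line(line):
-- 	first_last = {}
-- 	for i, c in enumerate(line):
-- 		if '1' <= c <= '9':
-- 			v = ord(c) - 48
-- 			if v in first_last:
-- 				first_last[v] = (first_last[v][0], i)
-- 			else:
-- 				first_last[v] = (i, i)
--
-- 	pair = []
-- 	for n in range(1, 10):
-- 		if n in first_last:
-- 			first, last = first_last[n]
-- 			if first == last:
-- 				pair.append((n, first))
-- 			else:
-- 				pair.append((n, last))
-- 				pair.append((n, first))
-- 	return pair
-- ===== Notes on version B (the rewrite author's own statement) =====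
-- stated objective: alternative
-- what changed: A scans the line 18 times (find and rfind for each digit 1-9); B makes one left-to-right pass recording each digit's first and last index in a dict, then emits the pairs for n = 1..9 in A's order (last index before first, one pair when they coincide).
import Mathlib
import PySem

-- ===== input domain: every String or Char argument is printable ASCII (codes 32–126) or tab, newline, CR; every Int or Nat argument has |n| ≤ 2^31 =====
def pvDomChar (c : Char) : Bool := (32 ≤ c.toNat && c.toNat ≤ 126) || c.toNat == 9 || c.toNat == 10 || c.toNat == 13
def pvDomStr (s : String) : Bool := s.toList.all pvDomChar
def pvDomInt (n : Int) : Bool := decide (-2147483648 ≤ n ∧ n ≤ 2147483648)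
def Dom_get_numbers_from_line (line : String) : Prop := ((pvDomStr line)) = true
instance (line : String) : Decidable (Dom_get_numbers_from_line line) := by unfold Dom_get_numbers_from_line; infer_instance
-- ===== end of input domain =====

-- B replaces A's nine find/rfind scans of the line by ONE pass recording each digit's
-- first and last index in a dict (objective: a single-pass alternative algorithm).

-- ===== PORT A =====
-- int(line[i]) : exact wherever A reaches it (there i is a valid index of a digit char,
-- so neither option is ever none; the .getD default is unreachable).
def pvIntAt (line : String) (i : Int) : Int :=
  ((PySem.Str.pyGet? line i).bind (fun c => PySem.Int.ofStr? (String.ofList [c]))).getD 0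

def get_numbers_from_line (line : String) : List (Int × Int) :=
  (PySem.List.pyRange 1 10 1).foldl (fun pair n =>
    let right_index := PySem.Str.find line (PySem.Int.toStr n)
    let left_index := PySem.Str.rfind line (PySem.Int.toStr n)
    if left_index = -1 ∧ right_index = -1 then pair
    else if left_index = right_index then
      pair ++ [(pvIntAt line left_index, left_index)]
    else
      let pair := if left_index ≠ -1 then pair ++ [(pvIntAt line left_index, left_index)] else pair
      if right_index ≠ -1 then pair ++ [(pvIntAt line right_index, right_index)] else pair) []

-- ===== PORT B =====
-- one step of B's single scan: a digit char p.1 at index p.2 records/updates (first, last)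
def pvAltStep (d : PySem.Dict Int (Int × Int)) (p : Char × Nat) : PySem.Dict Int (Int × Int) :=
  if '1' ≤ p.1 ∧ p.1 ≤ '9' then
    let v : Int := (p.1.toNat : Int) - 48
    match d.get? v with
    | some fl => d.insert v (fl.1, (p.2 : Int))
    | none => d.insert v ((p.2 : Int), (p.2 : Int))
  else d

def get_numbers_from_line_alt (line : String) : List (Int × Int) :=
  let d := (line.toList.zipIdx).foldl pvAltStep PySem.Dict.empty
  (PySem.List.pyRange 1 10 1).foldl (fun pair n =>
    match d.get? n with
    | none => pair
    | some fl =>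
      if fl.1 = fl.2 then pair ++ [(n, fl.1)]
      else pair ++ [(n, fl.2), (n, fl.1)]) []

-- ===== PRECONDITION & SPEC =====
def Spec_get_numbers_from_line (line : String) (out : List (Int × Int)) : Prop := out = get_numbers_from_line_alt line
instance (line : String) (out : List (Int × Int)) : Decidable (Spec_get_numbers_from_line line out) := by unfold Spec_get_numbers_from_line; infer_instance

-- ===== CLAIM (what is proved, stated in full; the proofs are below) =====
def Claim_equal_get_numbers_from_line : Prop := ∀ (line : String), Dom_get_numbers_from_line line → Spec_get_numbers_from_line line (get_numbers_from_line line)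

-- ===== LEMMAS AND PROOFS =====

/-- first and last index of the char `c` in a list, or none if absent. -/
def pvFL (c : Char) : List Char → Option (Nat × Nat)
  | [] => none
  | x :: xs =>
    match pvFL c xs with
    | some p => if x = c then some (0, p.2 + 1) else some (p.1 + 1, p.2 + 1)
    | none => if x = c then some (0, 0) else none

theorem pvFL_spec (c : Char) (cs : List Char) (p : Nat × Nat) (h : pvFL c cs = some p) :
    p.2 < cs.length ∧ cs[p.1]? = some c ∧ cs[p.2]? = some c := by
  induction cs generalizing p with
  | nil => simp [pvFL] at h
  | cons x xs ih =>
    cases hfl : pvFL c xs with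
    | none =>
      simp only [pvFL, hfl] at h
      by_cases hx : x = c
      · rw [if_pos hx] at h
        obtain rfl : (0, 0) = p := Option.some_inj.mp h
        subst hx
        exact ⟨by simp, by simp, by simp⟩
      · rw [if_neg hx] at h; exact absurd h (by simp)
    | some q =>
      simp only [pvFL, hfl] at h
      obtain ⟨h1, h2, h3⟩ := ih q hfl
      by_cases hx : x = c
      · rw [if_pos hx] at h
        obtain rfl : ((0 : Nat), q.2 + 1) = p := Option.some_inj.mp h
        subst hx
        exact ⟨by simpa using h1, by simp, by simpa using h3⟩
      · rw [if_neg hx] at h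
        obtain rfl : (q.1 + 1, q.2 + 1) = p := Option.some_inj.mp h
        exact ⟨by simpa using h1, by simpa using h2, by simpa using h3⟩

theorem pvFind_single (c : Char) (cs : List Char) :
    PySem.Chars.find cs [c] = (pvFL c cs).elim (-1) (fun p => (p.1 : Int)) := by
  have go : ∀ (cs : List Char) (k : Nat),
      PySem.Chars.find.go [c] cs k = (pvFL c cs).elim (-1) (fun p => ((k + p.1 : Nat) : Int)) := by
    intro cs
    induction cs with
    | nil => intro k; simp [PySem.Chars.find.go, pvFL]
    | cons x xs ih =>
      intro k
      rw [PySem.Chars.find.go]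
      by_cases hx : x = c
      · subst hx
        simp only [pvFL]
        cases hfl : pvFL x xs <;> simp [List.isPrefixOf]
      · have hpre : List.isPrefixOf [c] (x :: xs) = false := by
          simp [List.isPrefixOf]; intro h; exact absurd h.symm hx
        rw [hpre]
        simp only [if_neg Bool.false_ne_true, ih (k + 1), pvFL]
        cases hfl : pvFL c xs with
        | none => simp [hx]
        | some p => simp [hx]; omega
  rw [PySem.Chars.find, go]
  cases pvFL c cs <;> simp

theorem pvFL_append_singleton (c x : Char) (xs : List Char) :
    pvFL c (xs ++ [x]) =
      match pvFL c xs with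
      | some p => if x = c then some (p.1, xs.length) else some p
      | none => if x = c then some (xs.length, xs.length) else none := by
  induction xs with
  | nil => by_cases hx : x = c <;> simp [pvFL, hx]
  | cons y ys ih =>
    simp only [List.cons_append, pvFL, ih]
    cases hfl : pvFL c ys with
    | none =>
      by_cases hx : x = c <;> by_cases hy : y = c <;> simp [hx, hy, List.length_cons]
    | some p =>
      by_cases hx : x = c <;> by_cases hy : y = c <;> simp [hx, hy, List.length_cons]

theorem pvRfind_single (c : Char) (cs : List Char) :
    PySem.Chars.rfind cs [c] = (pvFL c cs).elim (-1) (fun p => (p.2 : Int)) := by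
  have go : ∀ (j : Nat),
      PySem.Chars.rfind.go cs [c] j = (pvFL c (cs.take (j + 1))).elim (-1) (fun p => (p.2 : Int)) := by
    intro j
    induction j with
    | zero =>
      rw [PySem.Chars.rfind.go]
      cases cs with
      | nil => simp [pvFL, List.isPrefixOf]
      | cons x xs =>
        by_cases hx : x = c
        · subst hx; simp [List.isPrefixOf, pvFL]
        · have hpre : List.isPrefixOf [c] (x :: xs) = false := by
            simp [List.isPrefixOf]; intro h; exact absurd h.symm hx
          rw [hpre]
          simp [pvFL, hx]
    | succ j ih =>
      rw [PySem.Chars.rfind.go]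
      by_cases hj : j + 1 < cs.length
      · have htake : cs.take (j + 2) = cs.take (j + 1) ++ [cs[j + 1]] := by
          rw [List.take_add_one, List.getElem?_eq_getElem hj]; rfl
        have hdrop : cs.drop (j + 1) = cs[j + 1] :: cs.drop (j + 2) := List.drop_eq_getElem_cons hj
        have hlen : (cs.take (j + 1)).length = j + 1 := List.length_take_of_le (Nat.le_of_lt hj)
        by_cases hx : cs[j + 1] = c
        · have hpre : List.isPrefixOf [c] (cs.drop (j + 1)) = true := by
            rw [hdrop]; simp [List.isPrefixOf, hx]
          rw [hpre, if_pos rfl, htake, pvFL_append_singleton]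
          cases hfl : pvFL c (cs.take (j + 1)) with
          | none => simp [hx, hlen]
          | some p => simp [hx, hlen]
        · have hpre : List.isPrefixOf [c] (cs.drop (j + 1)) = false := by
            rw [hdrop]; simp [List.isPrefixOf]; intro h; exact absurd h.symm hx
          rw [hpre]
          simp only [if_neg Bool.false_ne_true, ih, htake, pvFL_append_singleton]
          cases hfl : pvFL c (cs.take (j + 1)) with
          | none => simp [hx]
          | some p => simp [hx]
      · have hdrop : cs.drop (j + 1) = [] := List.drop_eq_nil_of_le (Nat.le_of_not_lt hj)
        have hpre : List.isPrefixOf [c] (cs.drop (j + 1)) = false := by rw [hdrop]; rfl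
        rw [hpre]
        simp only [if_neg Bool.false_ne_true, ih]
        rw [List.take_of_length_le (by omega), List.take_of_length_le (by omega)]
  rw [PySem.Chars.rfind, go cs.length]
  rw [List.take_of_length_le (by omega)]

theorem pvChar_toNat_inj {a b : Char} (h : a.toNat = b.toNat) : a = b :=
  Char.ext (UInt32.toNat_inj.mp h)

/-- combine an old dict entry with the (first, last) data of the remaining scan at offset k -/
def pvComb (k : Nat) (q? : Option (Int × Int)) (p? : Option (Nat × Nat)) : Option (Int × Int) :=
  match q?, p? with
  | none, none => none
  | none, some p => some (((k + p.1 : Nat) : Int), ((k + p.2 : Nat) : Int))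
  | some q, none => some q
  | some q, some p => some (q.1, ((k + p.2 : Nat) : Int))

theorem pvDict_inv (c : Char) (v : Int) (hc1 : '1' ≤ c) (hc9 : c ≤ '9')
    (hv : v = (c.toNat : Int) - 48) :
    ∀ (cs : List Char) (k : Nat) (d : PySem.Dict Int (Int × Int)),
      ((cs.zipIdx k).foldl pvAltStep d).get? v = pvComb k (d.get? v) (pvFL c cs) := by
  intro cs
  induction cs with
  | nil => intro k d; cases hd : d.get? v <;> simp [pvFL, pvComb, hd]
  | cons x xs ih =>
    intro k d
    rw [List.zipIdx_cons, List.foldl_cons, ih]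
    by_cases hg : '1' ≤ x ∧ x ≤ '9'
    · by_cases hx : x = c
      · subst hx
        have hstep : pvAltStep d (x, k) =
            match d.get? v with
            | some fl => d.insert v (fl.1, (k : Int))
            | none => d.insert v ((k : Int), (k : Int)) := by
          simp [pvAltStep, hg, ← hv]
        cases hd : d.get? v with
        | none =>
          rw [hstep, hd, PySem.Dict.get?_insert_self]
          simp only [pvFL]
          cases hfl : pvFL x xs with
          | none => simp [pvComb]
          | some p => simp [pvComb]; omega
        | some q =>
          rw [hstep, hd, PySem.Dict.get?_insert_self]
          simp only [pvFL]
          cases hfl : pvFL x xs with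
          | none => simp [pvComb]
          | some p => simp [pvComb]; omega
      · have hne : v ≠ ((x.toNat : Int) - 48) := by
          rw [hv]; intro h
          exact hx (pvChar_toNat_inj (by omega)).symm
        have hstep : (pvAltStep d (x, k)).get? v = d.get? v := by
          simp only [pvAltStep, if_pos hg]
          cases d.get? ((x.toNat : Int) - 48) <;>
            simp [PySem.Dict.get?_insert, hne]
        rw [hstep]
        simp only [pvFL]
        cases hd : d.get? v <;> cases hfl : pvFL c xs <;> simp [hx, pvComb] <;> omega
    · have hx : x ≠ c := by intro h; subst h; exact hg ⟨hc1, hc9⟩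
      have hstep : pvAltStep d (x, k) = d := by simp [pvAltStep, hg]
      rw [hstep]
      simp only [pvFL]
      cases hd : d.get? v <;> cases hfl : pvFL c xs <;> simp [hx, pvComb] <;> omega

theorem pvStep_eq (line : String) (n : Int) (c : Char)
    (hts : (PySem.Int.toStr n).toList = [c])
    (hof : PySem.Int.ofStr? (String.ofList [c]) = some n)
    (hc1 : '1' ≤ c) (hc9 : c ≤ '9') (hv : n = (c.toNat : Int) - 48)
    (pair : List (Int × Int)) :
    (let right_index := PySem.Str.find line (PySem.Int.toStr n)
     let left_index := PySem.Str.rfind line (PySem.Int.toStr n)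
     if left_index = -1 ∧ right_index = -1 then pair
     else if left_index = right_index then
       pair ++ [(pvIntAt line left_index, left_index)]
     else
       let pair := if left_index ≠ -1 then pair ++ [(pvIntAt line left_index, left_index)] else pair
       if right_index ≠ -1 then pair ++ [(pvIntAt line right_index, right_index)] else pair) =
    (match ((line.toList.zipIdx).foldl pvAltStep PySem.Dict.empty).get? n with
     | none => pair
     | some fl =>
       if fl.1 = fl.2 then pair ++ [(n, fl.1)]
       else pair ++ [(n, fl.2), (n, fl.1)]) := by
  have hfind : PySem.Str.find line (PySem.Int.toStr n) =
      (pvFL c line.toList).elim (-1) (fun p => (p.1 : Int)) := by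
    rw [PySem.Str.find_eq, hts, pvFind_single]
  have hrfind : PySem.Str.rfind line (PySem.Int.toStr n) =
      (pvFL c line.toList).elim (-1) (fun p => (p.2 : Int)) := by
    rw [PySem.Str.rfind_eq, hts, pvRfind_single]
  have hdict : ((line.toList.zipIdx).foldl pvAltStep PySem.Dict.empty).get? n =
      (pvFL c line.toList).map (fun p => ((p.1 : Int), (p.2 : Int))) := by
    rw [pvDict_inv c n hc1 hc9 hv line.toList 0 PySem.Dict.empty]
    have hemp : (PySem.Dict.empty : PySem.Dict Int (Int × Int)).get? n = none := rfl
    rw [hemp]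
    cases pvFL c line.toList <;> simp [pvComb]
  simp only [hfind, hrfind, hdict]
  cases hfl : pvFL c line.toList with
  | none => simp
  | some p =>
    obtain ⟨hlen, hfst, hlst⟩ := pvFL_spec c line.toList p hfl
    have hIntAt : ∀ i : Nat, line.toList[i]? = some c → pvIntAt line (i : Int) = n := by
      intro i hi
      unfold pvIntAt
      rw [PySem.Str.pyGet?_natCast, hi]
      have hof' : PySem.Int.ofChars? [c] = some n := by
        simpa [PySem.Int.ofStr?] using hof
      simp [hof']
    simp only [Option.elim, Option.map]
    by_cases heq : p.1 = p.2
    · rw [if_neg (by omega : ¬(((p.2 : Nat) : Int) = -1 ∧ ((p.1 : Nat) : Int) = -1)),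
        if_pos (by omega : ((p.2 : Nat) : Int) = ((p.1 : Nat) : Int)),
        hIntAt p.2 hlst, if_pos (by omega : ((p.1 : Nat) : Int) = ((p.2 : Nat) : Int))]
      simp [heq]
    · rw [if_neg (by omega : ¬(((p.2 : Nat) : Int) = -1 ∧ ((p.1 : Nat) : Int) = -1)),
        if_neg (by omega : ¬((p.2 : Nat) : Int) = ((p.1 : Nat) : Int)),
        if_neg (by simpa using heq : ¬((p.1 : Int)) = ((p.2 : Nat) : Int))]
      simp only [if_pos (by omega : ((p.2 : Nat) : Int) ≠ -1),
        if_pos (by omega : ((p.1 : Nat) : Int) ≠ -1),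
        hIntAt p.2 hlst, hIntAt p.1 hfst]
      simp

-- ===== VERDICT (by name: the statement is the Claim_ definition above) =====
theorem get_numbers_from_line_spec : Claim_equal_get_numbers_from_line := by
  intro line _
  unfold Spec_get_numbers_from_line get_numbers_from_line get_numbers_from_line_alt
  apply PySem.List.foldl_congr_mem
  intro pair n hn
  have h9 : PySem.List.pyRange 1 10 1 = [1, 2, 3, 4, 5, 6, 7, 8, 9] := by decide
  rw [h9] at hn
  simp only [List.mem_cons, List.not_mem_nil, or_false] at hn
  rcases hn with h | h | h | h | h | h | h | h | h <;> subst h <;>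
    first
    | exact pvStep_eq line 1 '1' (by decide) (by decide) (by decide) (by decide) (by decide) pair
    | exact pvStep_eq line 2 '2' (by decide) (by decide) (by decide) (by decide) (by decide) pair
    | exact pvStep_eq line 3 '3' (by decide) (by decide) (by decide) (by decide) (by decide) pair
    | exact pvStep_eq line 4 '4' (by decide) (by decide) (by decide) (by decide) (by decide) pair
    | exact pvStep_eq line 5 '5' (by decide) (by decide) (by decide) (by decide) (by decide) pair
    | exact pvStep_eq line 6 '6' (by decide) (by decide) (by decide) (by decide) (by decide) pair
    | exact pvStep_eq line 7 '7' (by decide) (by decide) (by decide) (by decide) (by decide) pair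
    | exact pvStep_eq line 8 '8' (by decide) (by decide) (by decide) (by decide) (by decide) pair
    | exact pvStep_eq line 9 '9' (by decide) (by decide) (by decide) (by decide) (by decide) pair
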